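-- pv_equiv track=rewrite | github.com/synthbot-anon/horsewords-lib | src/horsewords/template.py | get_field_tree
-- ===== SOURCE A (Python) =====
-- def get_field_tree(fields):
--   intermediates = set()
--   for leaf_field in fields:
--       path = leaf_field[1:].split('.')
--       for idx in range(1, len(path)):
--           interim = f'.{".".join(path[:idx])}'
--           intermediates.add(interim)
--   return fields.union(intermediates)
-- ===== SOURCE B (Python) =====
-- def get_field_tree(fields):
--     intermediates = set()
--     for field in fields:
--         prefix = '.'
--         for ch in field[1:]:
--             if ch == '.':
--                 intermediates.add(prefix)
--             prefix += ch
--     return fields.union(intermediates)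
-- ===== Notes on version B (the rewrite author's own statement) =====
-- stated objective: simpler
-- what changed: Instead of splitting each field on '.', indexing prefixes of the parts list and re-joining each one (quadratic work per field), B does one left-to-right character scan of field[1:] with a growing-prefix accumulator, emitting the accumulated prefix at every dot.
import Mathlib
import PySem

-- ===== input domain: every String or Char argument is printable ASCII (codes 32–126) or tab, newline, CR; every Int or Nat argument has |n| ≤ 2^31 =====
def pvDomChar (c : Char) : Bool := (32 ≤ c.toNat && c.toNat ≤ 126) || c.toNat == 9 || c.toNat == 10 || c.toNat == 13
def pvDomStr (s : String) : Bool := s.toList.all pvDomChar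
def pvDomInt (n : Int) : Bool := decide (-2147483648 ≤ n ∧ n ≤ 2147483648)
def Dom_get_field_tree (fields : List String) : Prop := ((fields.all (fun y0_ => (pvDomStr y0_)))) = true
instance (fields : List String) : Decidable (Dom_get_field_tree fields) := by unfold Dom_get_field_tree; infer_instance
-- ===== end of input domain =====

-- B replaces A's split/index/join machinery by a single left-to-right character scan of
-- field[1:] with a growing-prefix accumulator (starting at '.'), emitting the accumulated
-- prefix at every dot.  (objective: simpler; same set, same insertion order)

-- ===== PORT A =====
def get_field_tree (fields : List String) : List String :=
  let intermediates : PySem.Set String :=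
    fields.foldl (fun inter leaf_field =>
      let path := PySem.Chars.splitOn (PySem.List.slice leaf_field.toList (some 1)) ['.']
      (PySem.List.pyRange 1 (path.length : Int)).foldl (fun inter idx =>
        let interim := String.ofList ('.' :: PySem.Chars.join ['.'] (PySem.List.slice path none (some idx)))
        PySem.Set.add inter interim) inter) PySem.Set.empty
  PySem.Set.union (PySem.Set.ofList fields) intermediates

-- ===== PORT B =====
def get_field_tree_alt (fields : List String) : List String :=
  let intermediates : PySem.Set String :=
    fields.foldl (fun inter field =>
      ((PySem.List.slice field.toList (some 1)).foldl
        (fun (st : PySem.Set String × List Char) ch =>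
          if ch == '.' then (PySem.Set.add st.1 (String.ofList st.2), st.2 ++ [ch])
          else (st.1, st.2 ++ [ch]))
        (inter, ['.'])).1) PySem.Set.empty
  PySem.Set.union (PySem.Set.ofList fields) intermediates

-- ===== PRECONDITION & SPEC =====
def Spec_get_field_tree (fields : List String) (out : List String) : Prop := out = get_field_tree_alt fields
instance (fields : List String) (out : List String) : Decidable (Spec_get_field_tree fields out) := by unfold Spec_get_field_tree; infer_instance

-- ===== CLAIM (what is proved, stated in full; the proofs are below) =====
def Claim_equal_get_field_tree : Prop := ∀ (fields : List String), Dom_get_field_tree fields → Spec_get_field_tree fields (get_field_tree fields)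

-- ===== LEMMAS AND PROOFS =====

def mySplit : List Char → List Char → List (List Char)
  | pre, [] => [pre]
  | pre, c :: rest => if c = '.' then pre :: mySplit [] rest else mySplit (pre ++ [c]) rest

def dotPref : List Char → List Char → List (List Char)
  | _, [] => []
  | pre, c :: rest => if c = '.' then pre :: dotPref (pre ++ [c]) rest else dotPref (pre ++ [c]) rest

theorem go_eq (fuel : Nat) : ∀ (l cur : List Char) (accs : List (List Char)),
    l.length < fuel →
    PySem.Chars.splitOn.go ['.'] fuel l cur accs = accs.reverse ++ mySplit cur.reverse l := by
  induction fuel with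
  | zero => intro l cur accs h; omega
  | succ f ih =>
    intro l cur accs h
    cases l with
    | nil => simp [PySem.Chars.splitOn.go, mySplit]
    | cons c rest =>
      by_cases hc : c = '.'
      · subst hc
        have hpre : (['.'] : List Char).isPrefixOf ('.' :: rest) = true := by
          simp [List.isPrefixOf]
        simp only [PySem.Chars.splitOn.go, hpre, if_true, List.length_cons, List.length_nil,
          List.drop_succ_cons, List.drop_zero]
        rw [ih rest [] ((cur.reverse) :: accs) (by simp at h ⊢; omega)]
        simp [mySplit]
      · have hpre : (['.'] : List Char).isPrefixOf (c :: rest) = false := by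
          simp [List.isPrefixOf]
          exact fun h' => hc (by simpa using h'.symm)
        simp only [PySem.Chars.splitOn.go, hpre, Bool.false_eq_true, if_false]
        rw [ih rest (c :: cur) accs (by simp at h ⊢; omega)]
        simp [mySplit, hc]

theorem splitOn_eq (s : List Char) : PySem.Chars.splitOn s ['.'] = mySplit [] s := by
  unfold PySem.Chars.splitOn
  simpa using go_eq (s.length + 1) s [] [] (by omega)

theorem mySplit_ne_nil (s pre : List Char) : mySplit pre s ≠ [] := by
  cases s with
  | nil => simp [mySplit]
  | cons c rest =>
    by_cases hc : c = '.' <;> simp [mySplit, hc]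
    exact mySplit_ne_nil rest _

theorem join_cons (p : List Char) (xs : List (List Char)) (h : xs ≠ []) :
    PySem.Chars.join ['.'] (p :: xs) = p ++ '.' :: PySem.Chars.join ['.'] xs := by
  cases xs with
  | nil => exact absurd rfl h
  | cons q rest => rw [PySem.Chars.join_cons_cons]; simp

theorem dotPref_append (s : List Char) : ∀ (a b : List Char),
    dotPref (a ++ b) s = (dotPref b s).map (a ++ ·) := by
  induction s with
  | nil => intro a b; simp [dotPref]
  | cons c rest ih =>
    intro a b
    by_cases hc : c = '.'
    · simp only [dotPref, hc, if_true, List.map_cons]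
      rw [List.append_assoc, ih a (b ++ ['.'])]
    · simp only [dotPref, hc, if_false]
      rw [List.append_assoc, ih a (b ++ [c])]

theorem lemA (s : List Char) : ∀ (pre : List Char),
    (List.range ((mySplit pre s).length - 1)).map
      (fun k => PySem.Chars.join ['.'] ((mySplit pre s).take (k + 1))) = dotPref pre s := by
  induction s with
  | nil => intro pre; simp [mySplit, dotPref]
  | cons c rest ih =>
    intro pre
    by_cases hc : c = '.'
    · subst hc
      simp only [mySplit, dotPref, if_true]
      obtain ⟨m0, ms, hm⟩ := List.exists_cons_of_ne_nil (mySplit_ne_nil rest [])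
      have hlen : (pre :: mySplit [] rest).length - 1 = ((mySplit [] rest).length - 1) + 1 := by
        rw [hm]; simp
      rw [hlen, List.range_succ_eq_map, List.map_cons, List.map_map]
      have h0 : PySem.Chars.join ['.'] ((pre :: mySplit [] rest).take 1) = pre := by
        simp [PySem.Chars.join_singleton]
      rw [h0]
      have htail : ∀ k ∈ List.range ((mySplit [] rest).length - 1),
          ((fun k => PySem.Chars.join ['.'] ((pre :: mySplit [] rest).take (k + 1))) ∘ Nat.succ) k
            = (pre ++ ['.']) ++ PySem.Chars.join ['.'] ((mySplit [] rest).take (k + 1)) := by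
        intro k _
        simp only [Function.comp_apply, Nat.succ_eq_add_one]
        rw [List.take_succ_cons, join_cons _ _ (by rw [hm]; simp [List.take_succ_cons])]
        simp
      rw [List.map_congr_left htail]
      have hmm : (List.range ((mySplit [] rest).length - 1)).map
            (fun k => (pre ++ ['.']) ++ PySem.Chars.join ['.'] ((mySplit [] rest).take (k + 1)))
          = ((List.range ((mySplit [] rest).length - 1)).map
            (fun k => PySem.Chars.join ['.'] ((mySplit [] rest).take (k + 1)))).map ((pre ++ ['.']) ++ ·) := by
        rw [List.map_map]; rfl
      rw [hmm, ih []]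
      have hshift := dotPref_append rest (pre ++ ['.']) []
      simp only [List.append_nil] at hshift
      rw [← hshift]
    · simp only [mySplit, dotPref, hc, if_false]
      exact ih (pre ++ [c])

theorem pyRangeNat (n : Nat) :
    PySem.List.pyRange 1 (n : Int)
      = List.map (fun k : Nat => (1 : Int) + (k : Int)) (List.range (n - 1)) := by
  simp only [PySem.List.pyRange]
  norm_num
  split_ifs with h
  · rfl
  · have h0 : n - 1 = 0 := by omega
    rw [h0]

theorem scan_eq (s : List Char) : ∀ (inter : PySem.Set String) (pre : List Char),
    s.foldl (fun (st : PySem.Set String × List Char) ch =>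
        if ch == '.' then (PySem.Set.add st.1 (String.ofList st.2), st.2 ++ [ch])
        else (st.1, st.2 ++ [ch])) (inter, pre)
      = (PySem.Set.update inter ((dotPref pre s).map String.ofList), pre ++ s) := by
  induction s with
  | nil => intro inter pre; simp [dotPref, PySem.Set.update]
  | cons c rest ih =>
    intro inter pre
    rw [List.foldl_cons]
    by_cases hc : c = '.'
    · subst hc
      simp only [beq_self_eq_true, if_true]
      rw [ih (PySem.Set.add inter (String.ofList pre)) (pre ++ ['.'])]
      simp [dotPref, PySem.Set.update]
    · have hb : (c == '.') = false := by simp [hc]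
      rw [hb]
      simp only [Bool.false_eq_true, if_false]
      rw [ih inter (pre ++ [c])]
      simp [dotPref, hc]

theorem inner_eq (s : List Char) (inter : PySem.Set String) :
    (PySem.List.pyRange 1 ((PySem.Chars.splitOn s ['.']).length : Int)).foldl
      (fun inter idx =>
        PySem.Set.add inter (String.ofList ('.' :: PySem.Chars.join ['.']
          (PySem.List.slice (PySem.Chars.splitOn s ['.']) none (some idx))))) inter
    = (s.foldl (fun (st : PySem.Set String × List Char) ch =>
        if ch == '.' then (PySem.Set.add st.1 (String.ofList st.2), st.2 ++ [ch])
        else (st.1, st.2 ++ [ch])) (inter, ['.'])).1 := by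
  rw [scan_eq s inter ['.'], ← PySem.Set.update_map_eq_foldl_add]
  congr 1
  rw [splitOn_eq, pyRangeNat, List.map_map]
  have hA : (List.range ((mySplit [] s).length - 1)).map
        ((fun idx => String.ofList ('.' :: PySem.Chars.join ['.']
          (PySem.List.slice (mySplit [] s) none (some idx)))) ∘ (fun k : Nat => (1 : Int) + (k : Int)))
      = (List.range ((mySplit [] s).length - 1)).map
        (fun k => String.ofList ('.' :: PySem.Chars.join ['.'] ((mySplit [] s).take (k + 1)))) := by
    apply List.map_congr_left
    intro k _
    simp only [Function.comp_apply]
    rw [PySem.List.slice_to _ (by positivity)]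
    have hk : ((1 : Int) + (k : Int)).toNat = k + 1 := by omega
    rw [hk]
  rw [hA]
  have hA2 : (List.range ((mySplit [] s).length - 1)).map
        (fun k => String.ofList ('.' :: PySem.Chars.join ['.'] ((mySplit [] s).take (k + 1))))
      = (dotPref [] s).map (fun x => String.ofList ('.' :: x)) := by
    rw [← lemA s [], List.map_map]
    rfl
  rw [hA2]
  have hB : dotPref ['.'] s = (dotPref [] s).map (('.' : Char) :: ·) := by
    have := dotPref_append s ['.'] []
    simpa using this
  rw [hB, List.map_map]
  rfl

theorem ports_eq (fields : List String) : get_field_tree fields = get_field_tree_alt fields := by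
  simp only [get_field_tree, get_field_tree_alt]
  congr 1
  congr 1
  funext inter leaf
  exact inner_eq (PySem.List.slice leaf.toList (some 1)) inter

-- ===== VERDICT (by name: the statement is the Claim_ definition above) =====
theorem get_field_tree_spec : Claim_equal_get_field_tree := by
  intro fields _
  unfold Spec_get_field_tree
  exact ports_eq fields
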